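-- pv_equiv track=rewrite | github.com/drewcsillag/pocket_notebook | todo_date_math.py | add_todos
-- ===== SOURCE A (Python) =====
-- from typing import List
--
-- def add_todos(t: List[str], v: List[str]) -> List[str]:
--     """Add todos from v to t and return a new t"""
--     t = t[:]
--     for i in v:
--         if "" in t:
--             ind = t.index("")
--             t[ind] = i
--         else:
--             t.append(i)
--     return t
-- ===== SOURCE B (Python) =====
-- def add_todos(t, v):
--     """Add todos from v to t and return a new t"""
--     t = t[:]
--     p = 0  # first index that may still hold ""; everything before p is non-empty
--     for i in v:
--         while p < len(t) and t[p] != "":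
--             p += 1
--         if p < len(t):
--             t[p] = i
--         else:
--             t.append(i)
--     return t
-- ===== Notes on version B (the rewrite author's own statement) =====
-- stated objective: faster
-- what changed: Replaces the per-item '"" in t' scan plus t.index('') rescan with a single monotone pointer to the first possibly-empty slot, advanced only past non-empty cells, so each cell is scanned once overall.
import Mathlib
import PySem

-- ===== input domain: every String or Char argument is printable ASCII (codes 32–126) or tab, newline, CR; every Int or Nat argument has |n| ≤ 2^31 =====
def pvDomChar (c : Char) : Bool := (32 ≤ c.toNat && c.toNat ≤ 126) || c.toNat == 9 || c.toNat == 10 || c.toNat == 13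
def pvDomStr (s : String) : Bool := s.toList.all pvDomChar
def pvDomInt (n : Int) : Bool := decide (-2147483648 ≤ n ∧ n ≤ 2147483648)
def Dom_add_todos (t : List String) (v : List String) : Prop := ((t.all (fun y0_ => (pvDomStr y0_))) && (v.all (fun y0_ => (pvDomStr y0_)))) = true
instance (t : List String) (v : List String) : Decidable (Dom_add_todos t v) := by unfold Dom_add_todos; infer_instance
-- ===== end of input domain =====

-- B fills empty slots via a monotone forward pointer instead of A's repeated '"" in t' / t.index("") scans; faster (asymptotic).

-- ===== PORT A =====
-- for i in v: if "" in t: t[t.index("")] = i  else: t.append(i)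
def add_todos (t : List String) (v : List String) : List String :=
  v.foldl (fun t i =>
    if "" ∈ t then
      match PySem.List.index? t "" with
      | some ind => t.set ind i
      | none => t
    else t ++ [i]) t

-- ===== PORT B =====
-- the 'while p < len(t) and t[p] != "": p += 1' loop
def bAdvance (t : List String) (p : Nat) : Nat :=
  if h : p < t.length then
    if t[p] ≠ "" then bAdvance t (p + 1) else p
  else p
termination_by t.length - p

def add_todos_alt (t : List String) (v : List String) : List String :=
  (v.foldl (fun (s : List String × Nat) i =>
    let p := bAdvance s.1 s.2
    if p < s.1.length then (s.1.set p i, p) else (s.1 ++ [i], p)) (t, 0)).1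

-- ===== PRECONDITION & SPEC =====
def Spec_add_todos (t : List String) (v : List String) (out : List String) : Prop := out = add_todos_alt t v
instance (t : List String) (v : List String) (out : List String) : Decidable (Spec_add_todos t v out) := by unfold Spec_add_todos; infer_instance

-- ===== CLAIM (what is proved, stated in full; the proofs are below) =====
def Claim_equal_add_todos : Prop := ∀ (t : List String) (v : List String), Dom_add_todos t v → Spec_add_todos t v (add_todos t v)

-- ===== LEMMAS AND PROOFS =====

-- Under the invariant 'no empty slot before p', bAdvance lands on the first empty slot (or the length).
theorem bAdvance_spec (t : List String) (p : Nat)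
    (hinv : ∀ j (hj : j < t.length), j < p → t[j] ≠ "") :
    (∀ j (hj : j < t.length), j < bAdvance t p → t[j] ≠ "") ∧
    (∀ h : bAdvance t p < t.length, t[bAdvance t p] = "") := by
  fun_induction bAdvance t p with
  | case1 p h hne ih =>
      exact ih (by
        intro j hj hjp
        rcases Nat.lt_succ_iff_lt_or_eq.mp hjp with h' | h'
        · exact hinv j hj h'
        · subst h'; exact hne)
  | case2 p h hne =>
      exact ⟨fun j hj hjp => hinv j hj hjp, fun _ => not_not.mp hne⟩
  | case3 p h =>
      exact ⟨fun j hj hjp => hinv j hj hjp, fun h' => absurd h' h⟩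

theorem index?_of_first (t : List String) (k : Nat) (hk : k < t.length)
    (hfirst : ∀ j (hj : j < t.length), j < k → t[j] ≠ "") (hget : t[k] = "") :
    PySem.List.index? t "" = some k := by
  rw [PySem.List.index?_eq_some_iff]
  refine ⟨t.take k, t.drop (k + 1), ?_, by simp [Nat.le_of_lt hk], ?_⟩
  · conv_lhs => rw [← List.take_append_drop k t]
    rw [List.drop_eq_getElem_cons hk, hget]
  · intro hmem
    obtain ⟨j, hj, hje⟩ := List.getElem_of_mem hmem
    have hjk : j < k := by simp at hj; omega
    have hjt : j < t.length := lt_of_lt_of_le hjk hk.le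
    have := hfirst j hjt hjk
    rw [List.getElem_take] at hje
    exact this hje

theorem bAdvance_le (t : List String) (p : Nat) (h : p ≤ t.length) : bAdvance t p ≤ t.length := by
  fun_induction bAdvance t p with
  | case1 p hlt hne ih => exact ih hlt
  | case2 p hlt hne => exact le_of_lt hlt
  | case3 p hlt => exact h

theorem main_loop (v : List String) (t : List String) (p : Nat) (hp : p ≤ t.length)
    (hinv : ∀ j (hj : j < t.length), j < p → t[j] ≠ "") :
    v.foldl (fun t i =>
      if "" ∈ t then
        match PySem.List.index? t "" with
        | some ind => t.set ind i
        | none => t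
      else t ++ [i]) t =
    (v.foldl (fun (s : List String × Nat) i =>
      let p := bAdvance s.1 s.2
      if p < s.1.length then (s.1.set p i, p) else (s.1 ++ [i], p)) (t, p)).1 := by
  induction v generalizing t p with
  | nil => simp
  | cons i v ih =>
      obtain ⟨hpre, hat⟩ := bAdvance_spec t p hinv
      simp only [List.foldl_cons]
      by_cases hlt : bAdvance t p < t.length
      · have hidx : PySem.List.index? t "" = some (bAdvance t p) :=
          index?_of_first t _ hlt hpre (hat hlt)
        have hmem : "" ∈ t := by
          have hs : (PySem.List.index? t "").isSome := by rw [hidx]; rfl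
          exact (PySem.List.index?_isSome_iff t "").mp hs
        rw [if_pos hmem, hidx, if_pos hlt]
        exact ih (t.set (bAdvance t p) i) (bAdvance t p) (by simpa using le_of_lt hlt) (by
          intro j hj hjp
          rw [List.getElem_set_ne (by omega)]
          exact hpre j (by simpa using hj) hjp)
      · have hmem : "" ∉ t := by
          intro hmem
          obtain ⟨j, hj, hje⟩ := List.getElem_of_mem hmem
          exact hpre j hj (by omega) hje
        rw [if_neg hmem, if_neg hlt]
        have hlen : bAdvance t p = t.length := by
          have := bAdvance_le t p hp
          omega
        exact ih (t ++ [i]) (bAdvance t p) (by simp [hlen]) (by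
          intro j hj hjp
          rw [hlen] at hjp
          rw [List.getElem_append_left hjp]
          intro he
          exact hmem (he ▸ List.getElem_mem hjp))

-- ===== VERDICT (by name: the statement is the Claim_ definition above) =====
theorem add_todos_spec : Claim_equal_add_todos := by
  intro t v _
  unfold Spec_add_todos add_todos add_todos_alt
  exact main_loop v t 0 (Nat.zero_le _) (by omega)
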